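-- pv_equiv track=rewrite | github.com/Bogdan1232-ad/podgotovka | hw/160325/3374.py | f
-- ===== SOURCE A (Python) =====
-- def f(x, y, l=None):
--     if l is None:
--         l = set()
--     if x == y:
--         return 1
--     if x in l or x <= -50 or x >= 50:
--         return 0
--
--     new_l = l.copy()
--     new_l.add(x)
--
--     return f(x + 2, y, new_l) + f(x - 3, y, new_l)
-- ===== SOURCE B (Python) =====
-- def f(x, y, l=None):
--     # Iterative DFS with an explicit stack of (position, leaving) frames and one
--     # shared visited set; counts successful leaves with an accumulator instead of
--     # summing recursive return values (and never copies the set).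
--     visited = set() if l is None else set(l)
--     stack = [(x, False)]
--     count = 0
--     while stack:
--         pos, leaving = stack.pop()
--         if leaving:
--             visited.discard(pos)
--             continue
--         if pos == y:
--             count += 1
--             continue
--         if pos in visited or pos <= -50 or pos >= 50:
--             continue
--         visited.add(pos)
--         stack.append((pos, True))
--         stack.append((pos - 3, False))
--         stack.append((pos + 2, False))
--     return count
-- ===== Notes on version B (the rewrite author's own statement) =====
-- stated objective: alternative
-- what changed: B replaces A's binary recursion with per-call set copies by an iterative DFS over an explicit stack of (position, leaving) frames, one shared visited set mutated with add/discard, and a success counter instead of summed return values.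
import Mathlib
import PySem

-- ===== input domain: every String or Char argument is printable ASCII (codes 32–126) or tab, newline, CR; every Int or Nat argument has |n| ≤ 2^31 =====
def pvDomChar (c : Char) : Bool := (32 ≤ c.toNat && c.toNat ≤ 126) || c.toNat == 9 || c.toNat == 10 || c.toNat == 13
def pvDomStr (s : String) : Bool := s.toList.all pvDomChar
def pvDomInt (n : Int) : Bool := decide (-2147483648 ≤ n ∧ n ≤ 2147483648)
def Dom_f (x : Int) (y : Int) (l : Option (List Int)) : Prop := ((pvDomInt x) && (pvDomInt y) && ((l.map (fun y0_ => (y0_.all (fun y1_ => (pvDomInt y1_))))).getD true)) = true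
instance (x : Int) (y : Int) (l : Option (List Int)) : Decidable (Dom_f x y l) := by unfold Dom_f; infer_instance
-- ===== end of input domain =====

-- B replaces A's binary recursion (which copies the visited set at every call) by an
-- iterative DFS over an explicit stack of (position, leaving) frames with ONE shared
-- visited set and a success counter; return values are proved identical.

-- Number of still-unvisited positions in the open interval (-50, 50); both versions only
-- ever add such a position to the visited set, so this drives both termination measures.
def pvFuel (v : List Int) : Nat :=
  ((Finset.range 99).filter (fun i : ℕ => ((i : Int) - 49) ∉ v)).card

theorem pvFuel_lt {v : List Int} {x : Int} (hx1 : -49 ≤ x) (hx2 : x ≤ 49)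
    (hx : x ∉ v) (w : List Int) (hw : ∀ z, z ∈ w ↔ z ∈ v ∨ z = x) :
    pvFuel w < pvFuel v := by
  apply Finset.card_lt_card
  constructor
  · intro i hi
    simp only [Finset.mem_filter, Finset.mem_range] at hi ⊢
    exact ⟨hi.1, fun h => hi.2 ((hw _).mpr (Or.inl h))⟩
  · intro hsub
    have hcast : (((x + 49).toNat : Int)) = x + 49 := Int.toNat_of_nonneg (by omega)
    have hmem : (x + 49).toNat ∈ (Finset.range 99).filter (fun i : ℕ => ((i : Int) - 49) ∉ v) := by
      simp only [Finset.mem_filter, Finset.mem_range]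
      constructor
      · omega
      · rw [hcast]
        simpa [show x + 49 - 49 = x by ring] using hx
    have := hsub hmem
    simp only [Finset.mem_filter, hcast] at this
    exact this.2 (by simpa [show x + 49 - 49 = x by ring] using (hw x).mpr (Or.inr rfl))

-- ===== PORT A =====
-- A's recursive worker: copies the visited set (new_l = l.copy(); new_l.add(x)) per call.
def fRec (x : Int) (y : Int) (l : PySem.Set Int) : Int :=
  if x = y then 1
  else if h : PySem.Set.contains l x = true ∨ x ≤ -50 ∨ 50 ≤ x then 0
  else
    let new_l := PySem.Set.add l x
    fRec (x + 2) y new_l + fRec (x - 3) y new_l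
termination_by pvFuel l
decreasing_by
  all_goals
    simp only [not_or, not_le] at h
    exact pvFuel_lt (by omega) (by omega)
      (fun hx => h.1 ((PySem.Set.contains_iff l x).mpr hx)) (PySem.Set.add l x)
      (fun z => PySem.Set.mem_add l x z)

def f (x : Int) (y : Int) (l : Option (List Int)) : Int :=
  match l with
  | none => fRec x y PySem.Set.empty
  | some s => fRec x y (PySem.Set.ofList s)

-- ===== PORT B =====
-- Termination measure of B's while-loop: each stack frame (p, leaving) is weighted under
-- the visited set it will be processed with; the `leaving` frames in the stack record
-- exactly how the shared visited set evolves for the frames below them.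
def pvStkM : List (Int × Bool) → List Int → Nat
  | [], _ => 0
  | (_, false) :: rest, v => 4 ^ pvFuel v + pvStkM rest v
  | (p, true) :: rest, v => 1 + pvStkM rest (v.erase p)

-- B's while-loop: pop a frame; a `leaving` frame discards its position from the shared
-- visited set; otherwise count a success, prune, or push (leave, pos-3, pos+2) frames.
-- (Python pops from the list's end; here the head of the list is the top of the stack.)
def runStk (y : Int) : List (Int × Bool) → List Int → Int → Int
  | [], _, count => count
  | (p, true) :: rest, v, count => runStk y rest (v.erase p) count
  | (p, false) :: rest, v, count =>
    if p = y then runStk y rest v (count + 1)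
    else if h : v.contains p = true ∨ p ≤ -50 ∨ 50 ≤ p then runStk y rest v count
    else runStk y ((p + 2, false) :: (p - 3, false) :: (p, true) :: rest) (p :: v) count
termination_by stack v _ => pvStkM stack v
decreasing_by
  · simp only [pvStkM]; omega
  · have : 0 < 4 ^ pvFuel v := Nat.pow_pos (by norm_num)
    simp only [pvStkM]; omega
  · have : 0 < 4 ^ pvFuel v := Nat.pow_pos (by norm_num)
    simp only [pvStkM]; omega
  · simp only [not_or, not_le] at h
    have hnv : p ∉ v := fun hm => h.1 (by simpa using hm)
    have hlt : pvFuel (p :: v) < pvFuel v :=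
      pvFuel_lt (by omega) (by omega) hnv (p :: v) (fun z => by simp [List.mem_cons, or_comm])
    simp only [pvStkM, List.erase_cons_head]
    have h3 : 4 ^ pvFuel (p :: v) * 4 ≤ 4 ^ pvFuel v := by
      calc 4 ^ pvFuel (p :: v) * 4 = 4 ^ (pvFuel (p :: v) + 1) := by ring
        _ ≤ 4 ^ pvFuel v := Nat.pow_le_pow_right (by norm_num) (by omega)
    have : 0 < 4 ^ pvFuel (p :: v) := Nat.pow_pos (by norm_num)
    omega

def f_alt (x : Int) (y : Int) (l : Option (List Int)) : Int :=
  runStk y [(x, false)] (match l with | none => [] | some s => PySem.Set.ofList s) 0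

-- ===== PRECONDITION & SPEC =====
def Spec_f (x : Int) (y : Int) (l : Option (List Int)) (out : Int) : Prop := out = f_alt x y l
instance (x : Int) (y : Int) (l : Option (List Int)) (out : Int) : Decidable (Spec_f x y l out) := by unfold Spec_f; infer_instance

-- ===== CLAIM (what is proved, stated in full; the proofs are below) =====
def Claim_equal_f : Prop := ∀ (x : Int) (y : Int) (l : Option (List Int)), Dom_f x y l → Spec_f x y l (f x y l)

-- ===== LEMMAS AND PROOFS =====

-- Processing an `enter` frame adds exactly A's count for that position to the accumulator,
-- whenever the shared visited set and A's copied set have the same members.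
theorem runStk_enter (y : Int) (n : Nat) :
    ∀ (v : List Int) (s : PySem.Set Int), pvFuel v = n → (∀ z, z ∈ s ↔ z ∈ v) →
    ∀ (x : Int) (rest : List (Int × Bool)) (count : Int),
      runStk y ((x, false) :: rest) v count = runStk y rest v (count + fRec x y s) := by
  induction n using Nat.strong_induction_on with
  | _ n ih =>
    intro v s hn hm x rest count
    rw [runStk, fRec]
    by_cases hxy : x = y
    · simp [hxy]
    · rw [if_neg hxy, if_neg hxy]
      have hcs : PySem.Set.contains s x = true ↔ x ∈ v := by
        rw [PySem.Set.contains_iff]; exact hm x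
      by_cases hstop : x ∈ v ∨ x ≤ -50 ∨ 50 ≤ x
      · have hA : PySem.Set.contains s x = true ∨ x ≤ -50 ∨ 50 ≤ x := by
          rcases hstop with h | h
          · exact Or.inl (hcs.mpr h)
          · exact Or.inr h
        have hB : v.contains x = true ∨ x ≤ -50 ∨ 50 ≤ x := by
          rcases hstop with h | h
          · exact Or.inl (by simpa using h)
          · exact Or.inr h
        rw [dif_pos hA, dif_pos hB]
        simp
      · have hnv : x ∉ v := fun h => hstop (Or.inl h)
        have hb1 : -49 ≤ x := by omega
        have hb2 : x ≤ 49 := by omega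
        have hA : ¬(PySem.Set.contains s x = true ∨ x ≤ -50 ∨ 50 ≤ x) := by
          intro h
          rcases h with h | h
          · exact hnv (hcs.mp h)
          · exact hstop (Or.inr h)
        have hB : ¬(v.contains x = true ∨ x ≤ -50 ∨ 50 ≤ x) := by
          intro h
          rcases h with h | h
          · exact hnv (by simpa using h)
          · exact hstop (Or.inr h)
        rw [dif_neg hA, dif_neg hB]
        have hmem : ∀ z, z ∈ PySem.Set.add s x ↔ z ∈ (x :: v) := fun z => by
          rw [PySem.Set.mem_add]
          simp [List.mem_cons, hm z, or_comm]
        have hlt : pvFuel (x :: v) < n :=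
          hn ▸ pvFuel_lt hb1 hb2 hnv (x :: v) (fun z => by simp [List.mem_cons, or_comm])
        rw [ih _ hlt _ _ rfl hmem, ih _ hlt _ _ rfl hmem]
        show runStk y ((x, true) :: rest) (x :: v) _ = _
        rw [runStk, List.erase_cons_head]
        ring_nf

-- ===== VERDICT (by name: the statement is the Claim_ definition above) =====
theorem f_spec : Claim_equal_f := by
  intro x y l _
  unfold Spec_f f f_alt
  match l with
  | none =>
    rw [runStk_enter y (pvFuel []) [] PySem.Set.empty rfl
      (fun z => by simp [PySem.Set.empty]) x [] 0, runStk]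
    ring
  | some s =>
    rw [runStk_enter y (pvFuel (PySem.Set.ofList s)) (PySem.Set.ofList s)
      (PySem.Set.ofList s) rfl (fun z => Iff.rfl) x [] 0, runStk]
    ring
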